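-- pv_equiv track=rewrite | github.com/pechang03/processDMRs | graph_visualize.py | create_node_biclique_map
-- ===== SOURCE A (Python) =====
-- from typing import Dict, List, Set, Tuple
--
-- def create_node_biclique_map(bicliques: List[Tuple[Set[int], Set[int]]]) -> Dict[int, List[int]]:
--     """
--     Create mapping of nodes to their biclique numbers.
--
--     Args:
--         bicliques: List of (dmr_nodes, gene_nodes) tuples
--
--     Returns:
--         Dictionary mapping node IDs to list of biclique numbers they belong to
--     """
--     node_biclique_map = {}
--
--     for biclique_idx, (dmr_nodes, gene_nodes) in enumerate(bicliques):
--         for node in dmr_nodes | gene_nodes: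
--             if node not in node_biclique_map:
--                 node_biclique_map[node] = []
--             node_biclique_map[node].append(biclique_idx + 1)
--
--     return node_biclique_map
-- ===== SOURCE B (Python) =====
-- def create_node_biclique_map(bicliques):
--     """Map each node to the 1-based biclique numbers containing it.
--
--     Different decomposition: first collect the set of all nodes, then build
--     each node's list by one enumerate-scan per node (column-major instead of
--     A's row-major single pass with conditional dict insertion).
--     """
--     all_nodes = set()
--     for dmr_nodes, gene_nodes in bicliques:
--         all_nodes |= dmr_nodes | gene_nodes
--     return {
--         node: [i + 1 for i, (d, g) in enumerate(bicliques) if node in d or node in g]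
--         for node in all_nodes
--     }
-- ===== Notes on version B (the rewrite author's own statement) =====
-- stated objective: alternative
-- what changed: A makes one forward pass appending to per-node lists in a dict it grows conditionally; B first collects the set of all nodes and then builds each node's biclique-number list by a per-node scan over enumerate(bicliques) (column-major instead of row-major).
import Mathlib
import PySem

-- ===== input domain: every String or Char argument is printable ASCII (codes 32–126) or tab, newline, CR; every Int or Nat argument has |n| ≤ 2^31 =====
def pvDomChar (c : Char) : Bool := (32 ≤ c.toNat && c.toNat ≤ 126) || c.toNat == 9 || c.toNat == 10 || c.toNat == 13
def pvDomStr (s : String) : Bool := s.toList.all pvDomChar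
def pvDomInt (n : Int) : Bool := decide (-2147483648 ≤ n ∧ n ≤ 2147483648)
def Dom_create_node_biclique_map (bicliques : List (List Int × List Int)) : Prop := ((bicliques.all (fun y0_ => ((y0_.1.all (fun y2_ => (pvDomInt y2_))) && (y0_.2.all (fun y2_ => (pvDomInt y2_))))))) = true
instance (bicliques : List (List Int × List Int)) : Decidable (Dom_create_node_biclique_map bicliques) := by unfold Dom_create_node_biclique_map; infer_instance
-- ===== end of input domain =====

-- B collects the set of all nodes first, then builds each node's biclique-number
-- list by a per-node scan over the enumerated bicliques (column-major), instead of
-- A's single row-major pass growing a dict conditionally; objective: alternative.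


-- ===== PORT A =====
-- A-side helper: the body of the inner 'for node in dmr_nodes | gene_nodes' loop
def pvInnerA (i : Int) (m : PySem.Dict Int (List Int)) (node : Int) : PySem.Dict Int (List Int) :=
  let m1 := if m.contains node = false then m.insert node [] else m
  PySem.Dict.modify m1 node [] (fun l => l ++ [i + 1])

def create_node_biclique_map (bicliques : List (List Int × List Int)) : List (Int × List Int) :=
  ((PySem.List.enumerate bicliques).foldl
    (fun m p => (PySem.Set.union (PySem.Set.ofList p.2.1) p.2.2).foldl (pvInnerA p.1) m)
    PySem.Dict.empty).items

-- ===== PORT B =====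
def create_node_biclique_map_alt (bicliques : List (List Int × List Int)) : List (Int × List Int) :=
  let all_nodes : PySem.Set Int :=
    bicliques.foldl
      (fun s b => PySem.Set.update s (PySem.Set.union (PySem.Set.ofList b.1) b.2))
      PySem.Set.empty
  all_nodes.map (fun node =>
    (node, (PySem.List.enumerate bicliques).filterMap
      (fun p => if p.2.1.contains node || p.2.2.contains node then some (p.1 + 1) else none)))

-- ===== PRECONDITION & SPEC =====
def Spec_create_node_biclique_map (bicliques : List (List Int × List Int)) (out : List (Int × List Int)) : Prop := out = create_node_biclique_map_alt bicliques
instance (bicliques : List (List Int × List Int)) (out : List (Int × List Int)) : Decidable (Spec_create_node_biclique_map bicliques out) := by unfold Spec_create_node_biclique_map; infer_instance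

-- ===== CLAIM (what is proved, stated in full; the proofs are below) =====
def Claim_equal_create_node_biclique_map : Prop := ∀ (bicliques : List (List Int × List Int)), Dom_create_node_biclique_map bicliques → Spec_create_node_biclique_map bicliques (create_node_biclique_map bicliques)

-- ===== LEMMAS AND PROOFS =====

lemma pv_update_eq (s t : List Int) :
    PySem.Set.update s t = s ++ (PySem.Set.ofList t).filter (fun x => s.contains x = false) := by
  induction t generalizing s with
  | nil => simp [PySem.Set.update, PySem.Set.ofList]
  | cons x t' ih =>
    have hof : PySem.Set.ofList (x :: t') = PySem.Set.update [x] t' := by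
      simp [PySem.Set.ofList, PySem.Set.update, PySem.Set.add, PySem.Set.empty]
    have hupd : PySem.Set.update s (x :: t') = PySem.Set.update (PySem.Set.add s x) t' := rfl
    rw [hupd, ih, hof, ih]
    by_cases h : x ∈ s
    · have hadd : PySem.Set.add s x = s := by simp [PySem.Set.add, h]
      rw [hadd]
      simp only [List.cons_append, List.nil_append, List.filter_cons, List.filter_filter]
      have hx : (decide ((List.contains s x) = false)) = false := by simp [h]
      simp only [hx, Bool.false_eq_true, if_false]
      congr 1
      apply List.filter_congr
      intro y _
      by_cases hxy : y = x
      · subst hxy; simp [h]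
      · simp [hxy]
    · have hadd : PySem.Set.add s x = s ++ [x] := by simp [PySem.Set.add, h]
      rw [hadd]
      simp only [List.cons_append, List.nil_append, List.filter_cons, List.filter_filter]
      have hx : (decide ((List.contains s x) = false)) = true := by simp [h]
      simp only [hx, if_true, List.append_assoc, List.cons_append, List.nil_append]
      congr 2
      apply List.filter_congr
      intro y _
      by_cases hxy : y = x
      · subst hxy; simp
      · simp [hxy]

def pvU (b : List Int × List Int) : List Int :=
  PySem.Set.union (PySem.Set.ofList b.1) b.2

lemma pv_ofList_self (u : List Int) (hu : u.Nodup) : PySem.Set.ofList u = u := by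
  induction u with
  | nil => rfl
  | cons x u' ih =>
    have hof : PySem.Set.ofList (x :: u') = PySem.Set.update [x] u' := by
      simp [PySem.Set.ofList, PySem.Set.update, PySem.Set.add, PySem.Set.empty]
    rw [hof, pv_update_eq, ih (List.nodup_cons.mp hu).2]
    have hx : x ∉ u' := (List.nodup_cons.mp hu).1
    have : List.filter (fun a => List.contains [x] a = false) u' = u' := by
      apply List.filter_eq_self.mpr
      intro a ha
      have : a ≠ x := fun h => hx (h ▸ ha)
      simp [this]
    rw [this]
    rfl

lemma pv_nodup_U (b : List Int × List Int) : (pvU b).Nodup :=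
  PySem.Set.nodup_update _ _ (PySem.Set.nodup_ofList b.1)

lemma pv_contains_U (b : List Int × List Int) (n : Int) :
    (pvU b).contains n = (b.1.contains n || b.2.contains n) := by
  rw [Bool.eq_iff_iff]
  simp [pvU, PySem.Set.union, PySem.Set.mem_update, PySem.Set.mem_ofList]

lemma pv_step_of_contains (i : Int) (m : PySem.Dict Int (List Int)) (node : Int)
    (hc : m.contains node = true) :
    pvInnerA i m node = m.insert node (m.getD node [] ++ [i + 1]) := by
  simp [pvInnerA, hc, PySem.Dict.modify]

lemma pv_step_of_not_contains (i : Int) (m : PySem.Dict Int (List Int)) (node : Int)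
    (hc : m.contains node = false) :
    pvInnerA i m node = m.insert node [i + 1] := by
  simp only [pvInnerA, hc, if_true, PySem.Dict.modify, PySem.Dict.getD_insert_self,
    PySem.Dict.insert_insert_self, List.nil_append]

lemma pv_nodup_keys_step (i : Int) (m : PySem.Dict Int (List Int)) (node : Int)
    (hm : m.keys.Nodup) : (pvInnerA i m node).keys.Nodup := by
  by_cases hc : m.contains node = true
  · rw [pv_step_of_contains i m node hc]; exact PySem.Dict.nodup_keys_insert _ _ _ hm
  · rw [pv_step_of_not_contains i m node (by simpa using hc)]
    exact PySem.Dict.nodup_keys_insert _ _ _ hm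

lemma pv_nodup_keys_inner (i : Int) (u : List Int) (m : PySem.Dict Int (List Int))
    (hm : m.keys.Nodup) : (u.foldl (pvInnerA i) m).keys.Nodup := by
  induction u generalizing m with
  | nil => exact hm
  | cons x u' ih => exact ih _ (pv_nodup_keys_step i m x hm)

lemma pv_items_inner (i : Int) (u : List Int) (hu : u.Nodup)
    (m : PySem.Dict Int (List Int)) (hm : m.keys.Nodup) :
    (u.foldl (pvInnerA i) m).items =
      m.items.map (fun q => (q.1, if q.1 ∈ u then q.2 ++ [i + 1] else q.2))
      ++ (u.filter (fun n => m.contains n = false)).map (fun n => (n, [i + 1])) := by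
  induction u generalizing m with
  | nil => simp
  | cons x u' ih =>
    have hx : x ∉ u' := (List.nodup_cons.mp hu).1
    have hu' : u'.Nodup := (List.nodup_cons.mp hu).2
    rw [List.foldl_cons, ih hu' _ (pv_nodup_keys_step i m x hm)]
    by_cases hc : m.contains x = true
    · rw [pv_step_of_contains i m x hc]
      rw [PySem.Dict.items_insert_of_contains _ _ hc, List.map_map]
      congr 1
      · apply List.map_congr_left
        intro q hq
        by_cases hqx : q.1 = x
        · have hbeq : (q.1 == x) = true := by simp [hqx]
          have hv : m.getD q.1 [] = q.2 := PySem.Dict.getD_of_mem_items m (by simpa using hq) hm []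
          simp [Function.comp, hqx, hx, hv.symm]
        · have hbeq : (q.1 == x) = false := by simp [hqx]
          simp [Function.comp, hbeq, hqx]
      · congr 1
        rw [List.filter_cons_of_neg (by simp [hc])]
        apply List.filter_congr
        intro n hn
        have hnx : n ≠ x := fun h => hx (h ▸ hn)
        rw [PySem.Dict.contains_insert]
        simp [hnx]
    · have hc' : m.contains x = false := by simpa using hc
      rw [pv_step_of_not_contains i m x hc']
      rw [PySem.Dict.items_insert_of_not_contains _ _ hc', List.map_append]
      have hxk : x ∉ m.keys := by
        intro h
        rw [← PySem.Dict.contains_iff_mem_keys] at h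
        simp [h] at hc'
      rw [List.filter_cons_of_pos (by simp [hc'])]
      have h1 : m.items.map (fun q => (q.1, if q.1 ∈ u' then q.2 ++ [i + 1] else q.2))
          = m.items.map (fun q => (q.1, if q.1 ∈ x :: u' then q.2 ++ [i + 1] else q.2)) := by
        apply List.map_congr_left
        intro q hq
        have hqx : q.1 ≠ x := by
          intro h
          exact hxk (h ▸ PySem.Dict.mem_keys_of_mem_items _ hq)
        simp [hqx]
      have h2 : List.filter (fun n => decide ((m.insert x [i+1]).contains n = false)) u'
          = List.filter (fun n => decide (m.contains n = false)) u' := by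
        apply List.filter_congr
        intro n hn
        have hnx : n ≠ x := fun h => hx (h ▸ hn)
        rw [PySem.Dict.contains_insert]
        simp [hnx]
      rw [h1, h2]
      simp [hx]

def pvTail (l : List (Int × (List Int × List Int))) (n : Int) : List Int :=
  l.filterMap (fun p => if (pvU p.2).contains n then some (p.1 + 1) else none)

lemma pv_tail_cons (p : Int × (List Int × List Int)) (l : List (Int × (List Int × List Int))) (n : Int) :
    pvTail (p :: l) n = (if n ∈ pvU p.2 then [p.1 + 1] else []) ++ pvTail l n := by
  by_cases h : n ∈ pvU p.2 <;> simp [pvTail, h]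

lemma pv_ofList_append (a b : List Int) :
    PySem.Set.ofList (a ++ b) = PySem.Set.update (PySem.Set.ofList a) b := by
  simp [PySem.Set.ofList, PySem.Set.update, List.foldl_append]

lemma pv_keys_inner (i : Int) (u : List Int) (hu : u.Nodup)
    (m : PySem.Dict Int (List Int)) (hm : m.keys.Nodup) :
    (u.foldl (pvInnerA i) m).keys
      = m.keys ++ u.filter (fun n => m.contains n = false) := by
  show ((u.foldl (pvInnerA i) m).items.map Prod.fst) = _
  rw [pv_items_inner i u hu m hm, List.map_append, List.map_map, List.map_map,
      show (Prod.fst ∘ fun n : Int => (n, [i + 1])) = id from rfl, List.map_id,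
      show (Prod.fst ∘ fun q : Int × List Int => (q.1, if q.1 ∈ u then q.2 ++ [i + 1] else q.2))
        = Prod.fst from rfl]
  rfl

lemma pv_outer (l : List (Int × (List Int × List Int))) (m : PySem.Dict Int (List Int))
    (hm : m.keys.Nodup) :
    (l.foldl (fun m p => (pvU p.2).foldl (pvInnerA p.1) m) m).items =
      m.items.map (fun q => (q.1, q.2 ++ pvTail l q.1))
      ++ ((PySem.Set.ofList (l.flatMap (fun p => pvU p.2))).filter
            (fun n => m.contains n = false)).map (fun n => (n, pvTail l n)) := by
  induction l generalizing m with
  | nil => simp [pvTail, PySem.Set.ofList, PySem.Set.empty]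
  | cons p l' ih =>
    have hu : (pvU p.2).Nodup := pv_nodup_U p.2
    have hm' : ((pvU p.2).foldl (pvInnerA p.1) m).keys.Nodup := pv_nodup_keys_inner _ _ _ hm
    rw [List.foldl_cons, ih _ hm', pv_items_inner p.1 (pvU p.2) hu m hm]
    have hkeys := pv_keys_inner p.1 (pvU p.2) hu m hm
    -- rewrite the flatMap/ofList on the RHS
    rw [show (p :: l').flatMap (fun p => pvU p.2) = pvU p.2 ++ l'.flatMap (fun p => pvU p.2) from rfl,
        pv_ofList_append, pv_ofList_self _ hu, pv_update_eq, List.filter_append, List.filter_filter,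
        List.map_append, List.map_append, List.map_map, List.append_assoc]
    congr 1
    · -- old entries of m
      apply List.map_congr_left
      intro q _
      by_cases hq : q.1 ∈ pvU p.2 <;>
        simp [Function.comp, pv_tail_cons, hq]
    congr 1
    · -- nodes new in this biclique
      rw [List.map_map]
      apply List.map_congr_left
      intro n hn
      have hnu : n ∈ pvU p.2 := List.mem_of_mem_filter hn
      simp [Function.comp, pv_tail_cons, hnu]
    · -- nodes of later bicliques
      have hpred : ∀ n : Int,
          (decide ((((pvU p.2).foldl (pvInnerA p.1) m).contains n) = false))
            = (decide (m.contains n = false) && decide ((pvU p.2).contains n = false)) := by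
        intro n
        rw [PySem.Dict.contains_eq_decide_mem_keys, hkeys]
        by_cases h2 : m.contains n = true
        · have hk : n ∈ m.keys := (PySem.Dict.contains_iff_mem_keys m n).mp h2
          simp [hk, h2]
        · have h2' : m.contains n = false := by simpa using h2
          have hk : n ∉ m.keys := fun h =>
            absurd ((PySem.Dict.contains_iff_mem_keys m n).mpr h) (by simp [h2'])
          by_cases h1 : n ∈ pvU p.2
          · have hf : n ∈ List.filter (fun n => decide (m.contains n = false)) (pvU p.2) :=
              List.mem_filter.mpr ⟨h1, by simp [h2']⟩
            simp [hk, h2', h1]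
          · have hf : n ∉ List.filter (fun n => decide (m.contains n = false)) (pvU p.2) :=
              fun h => h1 (List.mem_of_mem_filter h)
            simp [hk, h2', h1]
      rw [List.filter_congr (fun n _ => hpred n)]
      apply List.map_congr_left
      intro n hn
      have hnu : n ∉ pvU p.2 := by
        have h2 := (List.mem_filter.mp hn).2
        simp only [Bool.and_eq_true, decide_eq_true_eq] at h2
        exact fun hmem => by rw [List.contains_iff_mem.mpr hmem] at h2; exact absurd h2.2 (by simp)
      simp [pv_tail_cons, hnu]

lemma pv_flatMap_enumerate (bs : List (List Int × List Int)) (s : Int) :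
    (PySem.List.enumerate bs s).flatMap (fun p => pvU p.2) = bs.flatMap pvU := by
  induction bs generalizing s with
  | nil => simp [PySem.List.enumerate_nil]
  | cons b bs' ih => rw [PySem.List.enumerate_cons]; simp [ih]

lemma pv_allnodes (bs : List (List Int × List Int)) (s : List Int) :
    bs.foldl (fun s b => PySem.Set.update s (pvU b)) s
      = PySem.Set.update s (bs.flatMap pvU) := by
  induction bs generalizing s with
  | nil => simp [PySem.Set.update]
  | cons b bs' ih =>
    rw [List.foldl_cons, ih, show (b :: bs').flatMap pvU = pvU b ++ bs'.flatMap pvU from rfl]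
    simp [PySem.Set.update, List.foldl_append]

lemma pv_main (bicliques : List (List Int × List Int)) :
    create_node_biclique_map bicliques = create_node_biclique_map_alt bicliques := by
  unfold create_node_biclique_map create_node_biclique_map_alt
  rw [show (fun (m : PySem.Dict Int (List Int)) (p : Int × (List Int × List Int)) =>
        (PySem.Set.union (PySem.Set.ofList p.2.1) p.2.2).foldl (pvInnerA p.1) m)
      = (fun m p => (pvU p.2).foldl (pvInnerA p.1) m) from rfl,
    pv_outer _ PySem.Dict.empty (by simp [PySem.Dict.empty, PySem.Dict.keys]),
    show (fun (s : PySem.Set Int) (b : List Int × List Int) =>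
        PySem.Set.update s (PySem.Set.union (PySem.Set.ofList b.1) b.2))
      = (fun s b => PySem.Set.update s (pvU b)) from rfl,
    pv_allnodes, pv_flatMap_enumerate]
  have hempty : (PySem.Dict.empty : PySem.Dict Int (List Int)).items = [] := rfl
  have hcont : ∀ n : Int, (PySem.Dict.empty : PySem.Dict Int (List Int)).contains n = false := fun n => rfl
  rw [hempty]
  simp only [List.map_nil, List.nil_append, hcont]
  rw [show (PySem.Set.update PySem.Set.empty (bicliques.flatMap pvU) : PySem.Set Int)
      = PySem.Set.ofList (bicliques.flatMap pvU) from rfl]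
  rw [List.filter_eq_self.mpr (fun (a : Int) (_ : a ∈ PySem.Set.ofList (bicliques.flatMap pvU)) => by simp)]
  apply List.map_congr_left
  intro n _
  have hfn : (fun p : Int × (List Int × List Int) => if (pvU p.2).contains n = true then some (p.1 + 1) else none)
      = (fun p => if (p.2.1.contains n || p.2.2.contains n) = true then some (p.1 + 1) else none) := by
    funext p
    rw [pv_contains_U]
  simp only [pvTail, hfn]

-- ===== VERDICT (by name: the statement is the Claim_ definition above) =====
theorem create_node_biclique_map_spec : Claim_equal_create_node_biclique_map := by
  intro bicliques _
  unfold Spec_create_node_biclique_map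
  exact pv_main bicliques
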